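-- pv_equiv track=rewrite | github.com/rigovo/rigovo-virtual-team | src/rigovo/application/graph/edges.py | _compute_blocked_roles
-- ===== SOURCE A (Python) =====
-- def _compute_blocked_roles(
--     execution_dag: dict[str, list[str]],
--     completed: set[str],
--     blocked: set[str],
-- ) -> set[str]:
--     """Compute blocked instances caused by unsatisfied blocked dependencies."""
--     blocked_out = set(blocked)
--     changed = True
--     while changed:
--         changed = False
--         for instance_id, deps in execution_dag.items():
--             if instance_id in completed or instance_id in blocked_out:
--                 continue
--             if any(dep in blocked_out for dep in deps):
--                 blocked_out.add(instance_id)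
--                 changed = True
--     return blocked_out
-- ===== SOURCE B (Python) =====
-- def _compute_blocked_roles(
--     execution_dag: dict[str, list[str]],
--     completed: set[str],
--     blocked: set[str],
-- ) -> set[str]:
--     """Compute blocked instances caused by unsatisfied blocked dependencies."""
--     dependents: dict[str, list[str]] = {}
--     for instance_id, deps in execution_dag.items():
--         for dep in deps:
--             dependents.setdefault(dep, []).append(instance_id)
--     blocked_out = set(blocked)
--     stack = list(blocked)
--     while stack:
--         node = stack.pop()
--         for child in dependents.get(node, []):
--             if child not in completed and child not in blocked_out:
--                 blocked_out.add(child)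
--                 stack.append(child)
--     return blocked_out
-- ===== Notes on version B (the rewrite author's own statement) =====
-- stated objective: alternative
-- what changed: Replaces A's repeated full-DAG fixpoint sweeps with a single worklist traversal (DFS from the initially blocked set over a precomputed reverse-adjacency index, skipping completed nodes).
import Mathlib
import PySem

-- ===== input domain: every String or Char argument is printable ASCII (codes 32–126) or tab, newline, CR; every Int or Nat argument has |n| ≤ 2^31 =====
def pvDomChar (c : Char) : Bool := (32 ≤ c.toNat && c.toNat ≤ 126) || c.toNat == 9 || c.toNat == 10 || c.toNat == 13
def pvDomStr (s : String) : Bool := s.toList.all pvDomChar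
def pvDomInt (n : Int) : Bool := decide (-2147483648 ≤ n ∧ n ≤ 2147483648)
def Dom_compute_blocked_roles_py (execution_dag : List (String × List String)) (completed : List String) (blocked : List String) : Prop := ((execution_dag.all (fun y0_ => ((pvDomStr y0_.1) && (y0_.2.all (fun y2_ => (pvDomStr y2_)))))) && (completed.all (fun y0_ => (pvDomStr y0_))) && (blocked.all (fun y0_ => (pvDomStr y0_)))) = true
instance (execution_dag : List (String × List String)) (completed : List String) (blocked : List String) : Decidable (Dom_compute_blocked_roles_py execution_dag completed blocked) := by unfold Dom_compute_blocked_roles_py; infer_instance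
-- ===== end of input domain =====

-- B replaces A's repeated full-DAG sweeps with a single reverse-adjacency worklist traversal from the
-- initially blocked set (objective: alternative). Both Pythons return a SET (no defined iteration order);
-- each port returns that set's elements in sorted order as its canonical list representative
-- (outputs are compared as finite sets).

-- ===== PORT A =====
-- one step of A's inner 'for instance_id, deps in execution_dag.items()' loop; state = (blocked_out, changed)
def pvPassA (completed : List String) (acc : List String × Bool) (p : String × List String) : List String × Bool :=
  if PySem.Set.contains completed p.1 || PySem.Set.contains acc.1 p.1 then acc
  else if p.2.any (fun dep => PySem.Set.contains acc.1 dep) then (PySem.Set.add acc.1 p.1, true)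
  else acc

-- A's 'while changed' loop; the fuel only makes it total (execution_dag.length + 1 passes always
-- reach the fixpoint, proved below in pvLoopA_closed)
def pvLoopA (execution_dag : List (String × List String)) (completed : List String) : Nat → List String → List String
  | 0, blocked_out => blocked_out
  | fuel + 1, blocked_out =>
    let r := execution_dag.foldl (pvPassA completed) (blocked_out, false)
    if r.2 then pvLoopA execution_dag completed fuel r.1 else r.1

def compute_blocked_roles_py (execution_dag : List (String × List String)) (completed : List String) (blocked : List String) : List String :=
  -- blocked_out = set(blocked); while changed: …; return blocked_out  (returned set rendered sorted)
  PySem.List.sorted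
    (pvLoopA execution_dag completed (execution_dag.length + 1) (PySem.Set.ofList blocked))
    (fun x => x) false

-- ===== PORT B =====
-- dependents.setdefault(dep, []).append(instance_id) over all edges
def pvDependents (execution_dag : List (String × List String)) : PySem.Dict String (List String) :=
  execution_dag.foldl
    (fun d p => p.2.foldl (fun d dep => d.modify dep [] (fun l => l ++ [p.1])) d)
    PySem.Dict.empty

-- one step of B's inner 'for child in dependents.get(node, [])' loop; state = (blocked_out, stack)
def pvVisitB (completed : List String) (acc : List String × List String) (child : String) : List String × List String :=
  if PySem.Set.contains completed child || PySem.Set.contains acc.1 child then acc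
  else (PySem.Set.add acc.1 child, acc.2 ++ [child])

-- B's 'while stack' loop; node = stack.pop() pops the LAST element; fuel only makes it total
def pvLoopB (completed : List String) (dependents : PySem.Dict String (List String)) : Nat → List String → List String → List String
  | 0, blocked_out, _ => blocked_out
  | fuel + 1, blocked_out, stack =>
    match stack.getLast? with
    | none => blocked_out
    | some node =>
      let r := (dependents.getD node []).foldl (pvVisitB completed) (blocked_out, stack.dropLast)
      pvLoopB completed dependents fuel r.1 r.2

def compute_blocked_roles_py_alt (execution_dag : List (String × List String)) (completed : List String) (blocked : List String) : List String :=
  PySem.List.sorted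
    (pvLoopB completed (pvDependents execution_dag) (blocked.length + execution_dag.length)
      (PySem.Set.ofList blocked) blocked)
    (fun x => x) false

-- ===== PRECONDITION & SPEC =====
def Spec_compute_blocked_roles_py (execution_dag : List (String × List String)) (completed : List String) (blocked : List String) (out : List String) : Prop := out = compute_blocked_roles_py_alt execution_dag completed blocked
instance (execution_dag : List (String × List String)) (completed : List String) (blocked : List String) (out : List String) : Decidable (Spec_compute_blocked_roles_py execution_dag completed blocked out) := by unfold Spec_compute_blocked_roles_py; infer_instance

-- ===== CLAIM (what is proved, stated in full; the proofs are below) =====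
def Claim_equal_compute_blocked_roles_py : Prop := ∀ (execution_dag : List (String × List String)) (completed : List String) (blocked : List String), Dom_compute_blocked_roles_py execution_dag completed blocked → Spec_compute_blocked_roles_py execution_dag completed blocked (compute_blocked_roles_py execution_dag completed blocked)

-- ===== LEMMAS AND PROOFS =====

-- a set C contains the initial blocked set and is closed under A's propagation rule
def pvClosed (execution_dag : List (String × List String)) (completed : List String) (C : List String) : Prop :=
  ∀ p ∈ execution_dag, p.1 ∉ completed → (∃ d ∈ p.2, d ∈ C) → p.1 ∈ C

-- number of dag keys not yet in S
def pvCnt (execution_dag : List (String × List String)) (S : List String) : Nat :=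
  ((execution_dag.map Prod.fst).toFinset \ S.toFinset).card

-- the pure effect of one pvPassA step on the first component
def pvStepA (completed : List String) (S : List String) (p : String × List String) : List String :=
  if PySem.Set.contains completed p.1 || PySem.Set.contains S p.1 then S
  else if p.2.any (fun dep => PySem.Set.contains S dep) then PySem.Set.add S p.1
  else S

theorem pv_add_of_not_mem (s : List String) (x : String) (h : x ∉ s) :
    PySem.Set.add s x = s ++ [x] := by
  simp only [PySem.Set.add]
  exact if_neg (fun hc => h ((PySem.Set.contains_iff s x).mp hc))

theorem pv_not_mem_of_contains_false (s : List String) (x : String)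
    (h : PySem.Set.contains s x = false) : x ∉ s := by
  intro hm
  rw [(PySem.Set.contains_iff s x).mpr hm] at h
  exact Bool.noConfusion h

theorem pvPassA_fst (completed : List String) (l : List (String × List String)) :
    ∀ S c, (l.foldl (pvPassA completed) (S, c)).1 = l.foldl (pvStepA completed) S := by
  induction l with
  | nil => intro S c; rfl
  | cons p t ih =>
    intro S c
    have h : pvPassA completed (S, c) p =
        (pvStepA completed S p, (pvPassA completed (S, c) p).2) := by
      simp only [pvPassA, pvStepA]
      split_ifs <;> rfl
    simp only [List.foldl_cons]
    rw [h, ih]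

theorem pvStepA_cases (completed : List String) (S : List String) (p : String × List String) :
    pvStepA completed S p = S ∨
      (pvStepA completed S p = S ++ [p.1] ∧ p.1 ∉ S ∧ p.1 ∉ completed ∧ ∃ d ∈ p.2, d ∈ S) := by
  unfold pvStepA
  split_ifs with h1 h2
  · exact Or.inl rfl
  · refine Or.inr ?_
    simp only [Bool.or_eq_true, not_or, Bool.not_eq_true] at h1
    obtain ⟨hcC, hcS⟩ := h1
    have hnS : p.1 ∉ S := pv_not_mem_of_contains_false S p.1 hcS
    have hnC : p.1 ∉ completed := pv_not_mem_of_contains_false completed p.1 hcC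
    refine ⟨pv_add_of_not_mem S p.1 hnS, hnS, hnC, ?_⟩
    rcases List.any_eq_true.mp h2 with ⟨d, hd, hdS⟩
    exact ⟨d, hd, (PySem.Set.contains_iff S d).mp hdS⟩
  · exact Or.inl rfl

theorem pvFoldA_subset (completed : List String) (l : List (String × List String)) :
    ∀ S, S ⊆ l.foldl (pvStepA completed) S := by
  induction l with
  | nil => intro S; exact fun _ h => h
  | cons p t ih =>
    intro S
    simp only [List.foldl_cons]
    refine Function.swap List.Subset.trans (ih _) ?_
    rcases pvStepA_cases completed S p with h | ⟨h, _⟩ <;> rw [h]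
    · exact fun _ hx => hx
    · exact fun x hx => List.mem_append_left _ hx

theorem pvFoldA_len_mono (completed : List String) (l : List (String × List String)) :
    ∀ S, S.length ≤ (l.foldl (pvStepA completed) S).length := by
  induction l with
  | nil => intro S; exact le_refl _
  | cons p t ih =>
    intro S
    simp only [List.foldl_cons]
    refine le_trans ?_ (ih _)
    rcases pvStepA_cases completed S p with h | ⟨h, _⟩ <;> simp [h]

theorem pvFoldA_mem (completed : List String) (l : List (String × List String)) :
    ∀ S x, x ∈ l.foldl (pvStepA completed) S → x ∈ S ∨ x ∈ l.map Prod.fst := by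
  induction l with
  | nil => intro S x h; exact Or.inl h
  | cons p t ih =>
    intro S x h
    simp only [List.foldl_cons] at h
    rcases ih _ x h with hx | hx
    · rcases pvStepA_cases completed S p with he | ⟨he, _⟩
      · rw [he] at hx; exact Or.inl hx
      · rw [he] at hx
        rcases List.mem_append.mp hx with hx | hx
        · exact Or.inl hx
        · have hxp : x = p.1 := by simpa using hx
          subst hxp
          exact Or.inr (by simp)
    · exact Or.inr (by simp [hx])

theorem pvFoldA_nodup (completed : List String) (l : List (String × List String)) :
    ∀ S, S.Nodup → (l.foldl (pvStepA completed) S).Nodup := by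
  induction l with
  | nil => intro S h; exact h
  | cons p t ih =>
    intro S h
    simp only [List.foldl_cons]
    refine ih _ ?_
    unfold pvStepA
    split_ifs
    · exact h
    · exact PySem.Set.nodup_add S p.1 h
    · exact h

theorem pvFoldA_sound (execution_dag : List (String × List String)) (completed : List String)
    (C : List String) (hC : pvClosed execution_dag completed C) (l : List (String × List String))
    (hl : ∀ p ∈ l, p ∈ execution_dag) :
    ∀ S, S ⊆ C → l.foldl (pvStepA completed) S ⊆ C := by
  induction l with
  | nil => intro S hS; exact hS
  | cons p t ih =>
    intro S hS
    simp only [List.foldl_cons]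
    refine ih (fun q hq => hl q (List.mem_cons_of_mem _ hq)) _ ?_
    rcases pvStepA_cases completed S p with h | ⟨h, _, hnC, d, hd, hdS⟩
    · rw [h]; exact hS
    · rw [h]
      intro x hx
      rcases List.mem_append.mp hx with hx | hx
      · exact hS hx
      · simp at hx
        subst hx
        exact hC p (hl p List.mem_cons_self) hnC ⟨d, hd, hS hdS⟩

theorem pvPassA_snd_mono (completed : List String) (l : List (String × List String)) :
    ∀ S, (l.foldl (pvPassA completed) (S, true)).2 = true := by
  induction l with
  | nil => intro S; rfl
  | cons p t ih =>
    intro S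
    simp only [List.foldl_cons]
    have h : (pvPassA completed (S, true) p) = ((pvPassA completed (S, true) p).1, true) := by
      simp only [pvPassA]; split_ifs <;> rfl
    rw [h]; exact ih _

theorem pvPassA_snd_false (completed : List String) (l : List (String × List String)) :
    ∀ S, (l.foldl (pvPassA completed) (S, false)).2 = false →
      l.foldl (pvStepA completed) S = S := by
  induction l with
  | nil => intro S _; rfl
  | cons p t ih =>
    intro S hsnd
    simp only [List.foldl_cons] at hsnd ⊢
    by_cases hstep : pvPassA completed (S, false) p = (S, false)
    · rw [hstep] at hsnd
      have ht := ih S hsnd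
      have hfix : pvStepA completed S p = S := by
        unfold pvPassA at hstep
        unfold pvStepA
        split_ifs at hstep ⊢ with h1 h2
        · rfl
        · exact absurd (congrArg Prod.snd hstep) (by simp)
        · rfl
      rw [hfix, ht]
    · exfalso
      have h2 : (pvPassA completed (S, false) p).2 = true := by
        unfold pvPassA at hstep ⊢
        split_ifs at hstep ⊢ with h1 h2
        · exact absurd rfl hstep
        · rfl
        · exact absurd rfl hstep
      have h : pvPassA completed (S, false) p = ((pvPassA completed (S, false) p).1, true) := by
        rw [← h2]
      rw [h, pvPassA_snd_mono completed t _] at hsnd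
      exact Bool.noConfusion hsnd

theorem pvPassA_snd_true (completed : List String) (l : List (String × List String)) :
    ∀ S, (l.foldl (pvPassA completed) (S, false)).2 = true →
      S.length < (l.foldl (pvStepA completed) S).length := by
  induction l with
  | nil => intro S h; exact Bool.noConfusion h
  | cons p t ih =>
    intro S hsnd
    simp only [List.foldl_cons] at hsnd ⊢
    have hfst := pvPassA_fst completed t
    by_cases hstep : pvPassA completed (S, false) p = (S, false)
    · rw [hstep] at hsnd
      have := ih S hsnd
      have hfix : pvStepA completed S p = S := by
        unfold pvPassA at hstep
        unfold pvStepA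
        split_ifs at hstep ⊢ with h1 h2
        · rfl
        · exact absurd (congrArg Prod.snd hstep) (by simp)
        · rfl
      rw [hfix]; exact this
    · have hadd : pvStepA completed S p = S ++ [p.1] := by
        rcases pvStepA_cases completed S p with h | ⟨h, _⟩
        · exfalso
          apply hstep
          unfold pvStepA at h
          unfold pvPassA
          split_ifs at h ⊢ with h1 h2
          · rfl
          · exfalso
            simp only [Bool.or_eq_true, not_or, Bool.not_eq_true] at h1
            rw [pv_add_of_not_mem S p.1 (pv_not_mem_of_contains_false S p.1 h1.2)] at h
            exact absurd (congrArg List.length h) (by simp)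
          · rfl
        · exact h
      calc S.length < (S ++ [p.1]).length := by simp
        _ ≤ _ := by rw [← hadd]; exact pvFoldA_len_mono completed t _

theorem pvFoldA_fix_closed (completed : List String) (l : List (String × List String)) :
    ∀ S, l.foldl (pvStepA completed) S = S →
      ∀ p ∈ l, p.1 ∉ completed → (∃ d ∈ p.2, d ∈ S) → p.1 ∈ S := by
  induction l with
  | nil => intro S _ p hp; exact absurd hp (List.not_mem_nil)
  | cons q t ih =>
    intro S hfix p hp hpc hdep
    simp only [List.foldl_cons] at hfix
    have hS1 : pvStepA completed S q = S := by
      rcases pvStepA_cases completed S q with h | ⟨h, _⟩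
      · exact h
      · exfalso
        have h1 : (S ++ [q.1]).length ≤ (t.foldl (pvStepA completed) (pvStepA completed S q)).length := by
          rw [← h]; exact pvFoldA_len_mono completed t _
        rw [hfix] at h1
        simp at h1
    rw [hS1] at hfix
    rcases List.mem_cons.mp hp with hpq | hpt
    · subst hpq
      by_contra hnS
      have : pvStepA completed S p = S ++ [p.1] := by
        unfold pvStepA
        have hcS : PySem.Set.contains S p.1 = false := by
          cases hc : PySem.Set.contains S p.1
          · rfl
          · exact absurd ((PySem.Set.contains_iff S p.1).mp hc) hnS
        have hcC : PySem.Set.contains completed p.1 = false := by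
          cases hc : PySem.Set.contains completed p.1
          · rfl
          · exact absurd ((PySem.Set.contains_iff completed p.1).mp hc) hpc
        rcases hdep with ⟨d, hd, hdS⟩
        have hany : p.2.any (fun dep => PySem.Set.contains S dep) = true :=
          List.any_eq_true.mpr ⟨d, hd, (PySem.Set.contains_iff S d).mpr hdS⟩
        rw [hcS, hcC, hany]
        simp only [Bool.or_self]
        exact pv_add_of_not_mem S p.1 hnS
      rw [this] at hS1
      have := congrArg List.length hS1
      simp at this
    · exact ih S hfix p hpt hpc hdep

theorem pvLoopA_subset (execution_dag : List (String × List String)) (completed : List String) :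
    ∀ fuel S, S ⊆ pvLoopA execution_dag completed fuel S := by
  intro fuel
  induction fuel with
  | zero => intro S; exact fun _ h => h
  | succ n ih =>
    intro S
    simp only [pvLoopA]
    have hsub : S ⊆ (execution_dag.foldl (pvPassA completed) (S, false)).1 := by
      rw [pvPassA_fst]; exact pvFoldA_subset completed execution_dag S
    split
    · exact List.Subset.trans hsub (ih _)
    · exact hsub

theorem pvLoopA_nodup (execution_dag : List (String × List String)) (completed : List String) :
    ∀ fuel S, S.Nodup → (pvLoopA execution_dag completed fuel S).Nodup := by
  intro fuel
  induction fuel with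
  | zero => intro S h; exact h
  | succ n ih =>
    intro S h
    simp only [pvLoopA]
    have hnd : (execution_dag.foldl (pvPassA completed) (S, false)).1.Nodup := by
      rw [pvPassA_fst]; exact pvFoldA_nodup completed execution_dag S h
    split
    · exact ih _ hnd
    · exact hnd

theorem pvLoopA_sound (execution_dag : List (String × List String)) (completed : List String)
    (C : List String) (hC : pvClosed execution_dag completed C) :
    ∀ fuel S, S ⊆ C → pvLoopA execution_dag completed fuel S ⊆ C := by
  intro fuel
  induction fuel with
  | zero => intro S h; exact h
  | succ n ih =>
    intro S h
    simp only [pvLoopA]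
    have hsub : (execution_dag.foldl (pvPassA completed) (S, false)).1 ⊆ C := by
      rw [pvPassA_fst]
      exact pvFoldA_sound execution_dag completed C hC execution_dag (fun p hp => hp) S h
    split
    · exact ih _ hsub
    · exact hsub

theorem pvLoopA_closed (execution_dag : List (String × List String)) (completed : List String) :
    ∀ fuel S, S.Nodup → pvCnt execution_dag S < fuel →
      pvClosed execution_dag completed (pvLoopA execution_dag completed fuel S) := by
  intro fuel
  induction fuel with
  | zero => intro S _ hcnt; exact absurd hcnt (Nat.not_lt_zero _)
  | succ n ih =>
    intro S hnd hcnt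
    simp only [pvLoopA]
    have hfst := pvPassA_fst completed execution_dag S false
    split
    · next hch =>
      set F := execution_dag.foldl (pvStepA completed) S with hF
      have hFr : (execution_dag.foldl (pvPassA completed) (S, false)).1 = F := hfst
      rw [hFr]
      have hlen : S.length < F.length := pvPassA_snd_true completed execution_dag S hch
      have hsub : S ⊆ F := pvFoldA_subset completed execution_dag S
      have hFnd : F.Nodup := pvFoldA_nodup completed execution_dag S hnd
      refine ih F hFnd ?_
      -- pvCnt strictly decreases
      have hx : ∃ x, x ∈ F ∧ x ∉ S := by
        by_contra hno
        have hFS : F ⊆ S := fun x hx => by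
          by_cases hxS : x ∈ S
          · exact hxS
          · exact absurd ⟨x, hx, hxS⟩ hno
        have h1 : F.length = F.toFinset.card := by
          rw [List.card_toFinset, List.Nodup.dedup hFnd]
        have h2 : F.toFinset ⊆ S.toFinset := by
          intro x hx
          simp only [List.mem_toFinset] at hx ⊢
          exact hFS hx
        have h3 : F.length ≤ S.length :=
          h1 ▸ le_trans (Finset.card_le_card h2) (List.toFinset_card_le S)
        omega
      rcases hx with ⟨x, hxF, hxS⟩
      have hxkey : x ∈ execution_dag.map Prod.fst := by
        rcases pvFoldA_mem completed execution_dag S x hxF with h | h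
        · exact absurd h hxS
        · exact h
      have hlt : pvCnt execution_dag F < pvCnt execution_dag S := by
        unfold pvCnt
        refine Finset.card_lt_card ?_
        constructor
        · intro y hy
          simp only [Finset.mem_sdiff, List.mem_toFinset] at hy ⊢
          exact ⟨hy.1, fun hyS => hy.2 (hsub hyS)⟩
        · intro hcon
          have hxmem : x ∈ (execution_dag.map Prod.fst).toFinset \ S.toFinset := by
            simp only [Finset.mem_sdiff, List.mem_toFinset]
            exact ⟨hxkey, hxS⟩
          have := hcon hxmem
          simp only [Finset.mem_sdiff, List.mem_toFinset] at this
          exact this.2 hxF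
      omega
    · next hch =>
      have hF : execution_dag.foldl (pvStepA completed) S = S := by
        apply pvPassA_snd_false completed execution_dag S
        cases h : (execution_dag.foldl (pvPassA completed) (S, false)).2
        · rfl
        · exact absurd h hch
      rw [hfst, hF]
      exact pvFoldA_fix_closed completed execution_dag S hF

-- B-side: membership in the reverse-adjacency index
theorem pvDependents_mem (execution_dag : List (String × List String)) (k x : String) :
    x ∈ (pvDependents execution_dag).getD k [] ↔
      ∃ p ∈ execution_dag, p.1 = x ∧ k ∈ p.2 := by
  have inner : ∀ (deps : List String) (d : PySem.Dict String (List String)) (id : String),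
      x ∈ (deps.foldl (fun d dep => d.modify dep [] (fun l => l ++ [id])) d).getD k [] ↔
        x ∈ d.getD k [] ∨ (x = id ∧ k ∈ deps) := by
    intro deps
    induction deps with
    | nil => intro d id; simp
    | cons dep t ih =>
      intro d id
      simp only [List.foldl_cons]
      rw [ih]
      rw [PySem.Dict.getD_modify]
      by_cases h : k = dep
      all_goals simp [h]
      all_goals tauto
  have outer : ∀ (l : List (String × List String)) (d : PySem.Dict String (List String)),
      x ∈ (l.foldl (fun d p => p.2.foldl (fun d dep => d.modify dep [] (fun l => l ++ [p.1])) d) d).getD k [] ↔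
        x ∈ d.getD k [] ∨ ∃ p ∈ l, p.1 = x ∧ k ∈ p.2 := by
    intro l
    induction l with
    | nil => intro d; simp
    | cons p t ih =>
      intro d
      simp only [List.foldl_cons]
      rw [ih, inner]
      simp only [List.mem_cons]
      constructor
      · rintro ((h | ⟨hx, hk⟩) | ⟨q, hq, hqx, hqk⟩)
        · exact Or.inl h
        · exact Or.inr ⟨p, Or.inl rfl, hx.symm, hk⟩
        · exact Or.inr ⟨q, Or.inr hq, hqx, hqk⟩
      · rintro (h | ⟨q, (hq | hq), hqx, hqk⟩)
        · exact Or.inl (Or.inl h)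
        · subst hq; exact Or.inl (Or.inr ⟨hqx.symm, hqk⟩)
        · exact Or.inr ⟨q, hq, hqx, hqk⟩
  unfold pvDependents
  rw [outer]
  simp [PySem.Dict.getD_empty]

-- one inner fold of B: everything appended to blocked_out is also appended to the stack
theorem pvVisitB_fold (completed : List String) (cs : List String) :
    ∀ S st, ∃ P, cs.foldl (pvVisitB completed) (S, st) = (S ++ P, st ++ P) ∧
      (∀ x ∈ P, x ∈ cs ∧ x ∉ completed ∧ x ∉ S) ∧
      (S.Nodup → (S ++ P).Nodup) ∧
      (∀ c ∈ cs, c ∈ completed ∨ c ∈ S ++ P) := by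
  induction cs with
  | nil =>
    intro S st
    exact ⟨[], by simp, by simp, fun h => by simpa using h, by simp⟩
  | cons c t ih =>
    intro S st
    simp only [List.foldl_cons]
    by_cases hskip : (PySem.Set.contains completed c || PySem.Set.contains S c) = true
    · have hstep : pvVisitB completed (S, st) c = (S, st) := by
        unfold pvVisitB; rw [if_pos hskip]
      rw [hstep]
      rcases ih S st with ⟨P, hP, hmem, hnd, hcl⟩
      refine ⟨P, hP, fun x hx => ⟨List.mem_cons_of_mem _ (hmem x hx).1, (hmem x hx).2.1, (hmem x hx).2.2⟩, hnd, ?_⟩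
      intro e he
      rcases List.mem_cons.mp he with he | he
      · subst he
        rcases Bool.or_eq_true_iff.mp hskip with h | h
        · exact Or.inl ((PySem.Set.contains_iff completed e).mp h)
        · exact Or.inr (List.mem_append_left _ ((PySem.Set.contains_iff S e).mp h))
      · exact hcl e he
    · have hcC : PySem.Set.contains completed c = false := by
        cases h : PySem.Set.contains completed c
        · rfl
        · exact absurd (by rw [h]; simp) hskip
      have hcS : PySem.Set.contains S c = false := by
        cases h : PySem.Set.contains S c
        · rfl
        · exact absurd (by rw [h, Bool.or_true]) hskip
      have hnC : c ∉ completed := pv_not_mem_of_contains_false completed c hcC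
      have hnS : c ∉ S := pv_not_mem_of_contains_false S c hcS
      have hstep : pvVisitB completed (S, st) c = (S ++ [c], st ++ [c]) := by
        unfold pvVisitB
        rw [if_neg hskip, pv_add_of_not_mem S c hnS]
      rw [hstep]
      rcases ih (S ++ [c]) (st ++ [c]) with ⟨P, hP, hmem, hnd, hcl⟩
      refine ⟨c :: P, ?_, ?_, ?_, ?_⟩
      · rw [hP]; simp
      · intro x hx
        rcases List.mem_cons.mp hx with hx | hx
        · subst hx; exact ⟨by simp, hnC, hnS⟩
        · refine ⟨List.mem_cons_of_mem _ (hmem x hx).1, (hmem x hx).2.1, fun hxS => (hmem x hx).2.2 (List.mem_append_left _ hxS)⟩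
      · intro hSnd
        have h1 : (S ++ [c]).Nodup := by
          rw [List.nodup_append]
          refine ⟨hSnd, List.nodup_singleton c, ?_⟩
          intro a haS b hb
          have hbc : b = c := by simpa using hb
          subst hbc
          exact fun h => hnS (h ▸ haS)
        have := hnd h1
        simpa using this
      · intro e he
        rcases List.mem_cons.mp he with he | he
        · subst he
          exact Or.inr (by simp)
        · rcases hcl e he with h | h
          · exact Or.inl h
          · refine Or.inr ?_
            simpa using h

theorem pvLoopB_subset (completed : List String) (dependents : PySem.Dict String (List String)) :
    ∀ fuel S stack, S ⊆ pvLoopB completed dependents fuel S stack := by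
  intro fuel
  induction fuel with
  | zero => intro S stack; exact fun _ h => h
  | succ n ih =>
    intro S stack
    cases hlast : stack.getLast? with
    | none => simp only [pvLoopB, hlast]; exact fun _ h => h
    | some node =>
      simp only [pvLoopB, hlast]
      rcases pvVisitB_fold completed ((dependents.getD node [])) S stack.dropLast with ⟨P, hP, _, _, _⟩
      rw [hP]
      exact List.Subset.trans (List.subset_append_left S P) (ih _ _)

theorem pvLoopB_nodup (completed : List String) (dependents : PySem.Dict String (List String)) :
    ∀ fuel S stack, S.Nodup → (pvLoopB completed dependents fuel S stack).Nodup := by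
  intro fuel
  induction fuel with
  | zero => intro S stack h; exact h
  | succ n ih =>
    intro S stack h
    cases hlast : stack.getLast? with
    | none => simp only [pvLoopB, hlast]; exact h
    | some node =>
      simp only [pvLoopB, hlast]
      rcases pvVisitB_fold completed ((dependents.getD node [])) S stack.dropLast with ⟨P, hP, _, hnd, _⟩
      rw [hP]
      exact ih _ _ (hnd h)

theorem pvLoopB_sound (execution_dag : List (String × List String)) (completed : List String)
    (C : List String) (hC : pvClosed execution_dag completed C) :
    ∀ fuel S stack, S ⊆ C → stack ⊆ S →
      pvLoopB completed (pvDependents execution_dag) fuel S stack ⊆ C := by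
  intro fuel
  induction fuel with
  | zero => intro S stack hS _; exact hS
  | succ n ih =>
    intro S stack hS hstack
    cases hlast : stack.getLast? with
    | none => simp only [pvLoopB, hlast]; exact hS
    | some node =>
      simp only [pvLoopB, hlast]
      have hnode : node ∈ S := hstack (List.mem_of_getLast? hlast)
      rcases pvVisitB_fold completed (((pvDependents execution_dag).getD node [])) S stack.dropLast with ⟨P, hP, hmem, _, _⟩
      rw [hP]
      refine ih _ _ ?_ ?_
      · intro x hx
        rcases List.mem_append.mp hx with hx | hx
        · exact hS hx
        · rcases hmem x hx with ⟨hxcs, hxC, _⟩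
          rcases (pvDependents_mem execution_dag node x).mp hxcs with ⟨p, hp, hpx, hpk⟩
          subst hpx
          exact hC p hp hxC ⟨node, hpk, hS hnode⟩
      · intro x hx
        rcases List.mem_append.mp hx with hx | hx
        · exact List.mem_append_left _ (hstack (List.dropLast_subset stack hx))
        · exact List.mem_append_right _ hx

theorem pvLoopB_closed (execution_dag : List (String × List String)) (completed : List String) :
    ∀ fuel S stack, S.Nodup → stack ⊆ S →
      (∀ x ∈ S, x ∈ stack ∨
        ∀ c ∈ (pvDependents execution_dag).getD x [], c ∈ completed ∨ c ∈ S) →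
      stack.length + pvCnt execution_dag S ≤ fuel →
      pvClosed execution_dag completed
        (pvLoopB completed (pvDependents execution_dag) fuel S stack) := by
  have closed_of_inv : ∀ S : List String,
      (∀ x ∈ S, ∀ c ∈ (pvDependents execution_dag).getD x [], c ∈ completed ∨ c ∈ S) →
      pvClosed execution_dag completed S := by
    intro S hproc p hp hpc ⟨d, hd, hdS⟩
    have hp1 : p.1 ∈ (pvDependents execution_dag).getD d [] :=
      (pvDependents_mem execution_dag d p.1).mpr ⟨p, hp, rfl, hd⟩
    rcases hproc d hdS p.1 hp1 with h | h
    · exact absurd h hpc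
    · exact h
  intro fuel
  induction fuel with
  | zero =>
    intro S stack hnd hstack hinv hfuel
    have hempty : stack = [] := by
      have := Nat.le_zero.mp hfuel
      exact List.eq_nil_of_length_eq_zero (by omega)
    subst hempty
    simp only [pvLoopB]
    refine closed_of_inv S (fun x hx => ?_)
    rcases hinv x hx with h | h
    · exact absurd h (List.not_mem_nil)
    · exact h
  | succ n ih =>
    intro S stack hnd hstack hinv hfuel
    cases hlast : stack.getLast? with
    | none =>
      simp only [pvLoopB, hlast]
      have hempty : stack = [] := List.getLast?_eq_none_iff.mp hlast
      subst hempty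
      refine closed_of_inv S (fun x hx => ?_)
      rcases hinv x hx with h | h
      · exact absurd h (List.not_mem_nil)
      · exact h
    | some node =>
      simp only [pvLoopB, hlast]
      have hsplit : stack.dropLast ++ [node] = stack :=
        List.dropLast_append_getLast? node hlast
      have hnode : node ∈ S := hstack (List.mem_of_getLast? hlast)
      rcases pvVisitB_fold completed (((pvDependents execution_dag).getD node [])) S stack.dropLast with
        ⟨P, hP, hmem, hndP, hcl⟩
      rw [hP]
      have hndSP : (S ++ P).Nodup := hndP hnd
      refine ih (S ++ P) (stack.dropLast ++ P) hndSP ?_ ?_ ?_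
      · intro x hx
        rcases List.mem_append.mp hx with hx | hx
        · exact List.mem_append_left _ (hstack (List.dropLast_subset stack hx))
        · exact List.mem_append_right _ hx
      · intro x hx
        rcases List.mem_append.mp hx with hx | hx
        · rcases hinv x hx with h | h
          · rw [← hsplit] at h
            rcases List.mem_append.mp h with h | h
            · exact Or.inl (List.mem_append_left _ h)
            · have hxnode : x = node := by simpa using h
              subst hxnode
              exact Or.inr (fun c hc => hcl c hc)
          · exact Or.inr (fun c hc => (h c hc).imp id (List.mem_append_left _))
        · exact Or.inl (List.mem_append_right _ hx)
      · -- fuel arithmetic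
        have hPnd : P.Nodup := (List.nodup_append.mp hndSP).2.1
        have hPdisj : ∀ x ∈ P, x ∉ S := fun x hx => (hmem x hx).2.2
        have hPkeys : ∀ x ∈ P, x ∈ execution_dag.map Prod.fst := by
          intro x hx
          rcases (pvDependents_mem execution_dag node x).mp (hmem x hx).1 with ⟨p, hp, hpx, _⟩
          subst hpx
          exact List.mem_map_of_mem hp
        have hPsub : P.toFinset ⊆ (execution_dag.map Prod.fst).toFinset \ S.toFinset := by
          intro x hx
          simp only [List.mem_toFinset] at hx
          simp only [Finset.mem_sdiff, List.mem_toFinset]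
          exact ⟨hPkeys x hx, hPdisj x hx⟩
        have hPlen : P.toFinset.card = P.length := by
          rw [List.card_toFinset, List.Nodup.dedup hPnd]
        have hPle : P.length ≤ pvCnt execution_dag S := by
          rw [← hPlen]
          exact Finset.card_le_card hPsub
        have hcard : pvCnt execution_dag (S ++ P) = pvCnt execution_dag S - P.length := by
          unfold pvCnt
          rw [List.toFinset_append]
          have h1 : (execution_dag.map Prod.fst).toFinset \ (S.toFinset ∪ P.toFinset) =
              ((execution_dag.map Prod.fst).toFinset \ S.toFinset) \ P.toFinset := by
            ext y
            simp only [Finset.mem_sdiff, Finset.mem_union]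
            tauto
          rw [h1, Finset.card_sdiff, Finset.inter_eq_left.mpr hPsub, hPlen]
        have hstlen : stack.length = stack.dropLast.length + 1 := by
          conv_lhs => rw [← hsplit]
          simp
        rw [List.length_append, hcard]
        unfold pvCnt at hfuel hPle ⊢
        omega

-- ===== VERDICT (by name: the statement is the Claim_ definition above) =====
theorem compute_blocked_roles_py_spec : Claim_equal_compute_blocked_roles_py := by
  unfold Claim_equal_compute_blocked_roles_py
  intro execution_dag completed blocked _
  unfold Spec_compute_blocked_roles_py compute_blocked_roles_py compute_blocked_roles_py_alt
  set S0 := PySem.Set.ofList blocked with hS0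
  set A := pvLoopA execution_dag completed (execution_dag.length + 1) S0 with hA
  set B := pvLoopB completed (pvDependents execution_dag) (blocked.length + execution_dag.length) S0 blocked with hB
  have hS0nd : S0.Nodup := PySem.Set.nodup_ofList blocked
  have hblS0 : blocked ⊆ S0 := fun x hx => (PySem.Set.mem_ofList blocked x).mpr hx
  have hAnd : A.Nodup := pvLoopA_nodup execution_dag completed _ _ hS0nd
  have hBnd : B.Nodup := pvLoopB_nodup completed _ _ _ _ hS0nd
  have hcnt : pvCnt execution_dag S0 ≤ execution_dag.length := by
    unfold pvCnt
    calc ((execution_dag.map Prod.fst).toFinset \ S0.toFinset).card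
        ≤ (execution_dag.map Prod.fst).toFinset.card := Finset.card_le_card (Finset.sdiff_subset)
      _ ≤ (execution_dag.map Prod.fst).length := List.toFinset_card_le _
      _ = execution_dag.length := List.length_map _ 
  have hAcl : pvClosed execution_dag completed A :=
    pvLoopA_closed execution_dag completed _ _ hS0nd (by omega)
  have hBcl : pvClosed execution_dag completed B := by
    refine pvLoopB_closed execution_dag completed _ S0 blocked hS0nd hblS0 ?_ ?_
    · intro x hx
      exact Or.inl ((PySem.Set.mem_ofList blocked x).mp hx)
    · omega
  have hS0A : S0 ⊆ A := pvLoopA_subset execution_dag completed _ _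
  have hS0B : S0 ⊆ B := pvLoopB_subset completed _ _ _ _
  have hAB : A ⊆ B := pvLoopA_sound execution_dag completed B hBcl _ _ hS0B
  have hBA : B ⊆ A := pvLoopB_sound execution_dag completed A hAcl _ _ _ hS0A hblS0
  have hperm : (PySem.List.sorted B (fun x => x) false).Perm A :=
    (PySem.List.sorted_perm B (fun x => x) false).trans
      ((List.perm_ext_iff_of_nodup hBnd hAnd).mpr (fun a => ⟨fun h => hBA h, fun h => hAB h⟩))
  have hsnd : (PySem.List.sorted B (fun x => x) false).Nodup :=
    (PySem.List.sorted_perm B (fun x => x) false).nodup_iff.mpr hBnd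
  have hle : (PySem.List.sorted B (fun x => x) false).Pairwise (fun a b => a ≤ b) :=
    PySem.List.sorted_pairwise B (fun x => x)
  have hlt : (PySem.List.sorted B (fun x => x) false).Pairwise (fun a b => a < b) := by
    have hne : (PySem.List.sorted B (fun x => x) false).Pairwise (fun a b => a ≠ b) := hsnd
    exact (hle.and hne).imp (fun h => lt_of_le_of_ne h.1 h.2)
  exact PySem.List.sorted_eq_of_perm_of_pairwise_lt A (PySem.List.sorted B (fun x => x) false) (fun x => x) hperm hlt
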